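-- pv_equiv track=rewrite | github.com/francoisgaston/SIA | TP2/src/selection_engine.py | roulette
-- ===== SOURCE A (Python) =====
-- def roulette(qi_array, rj_array):
--     individuals_index = []
--     for rj in rj_array:
--         for i, qi in enumerate(qi_array):
--             if qi > rj:
--                 individuals_index.append(i)
--                 break
--     return individuals_index
-- ===== SOURCE B (Python) =====
-- def roulette(qi_array, rj_array):
--     # Prefix-maximum records: (value, index) where value beats all earlier qi.
--     # The first qi exceeding rj is always a record, and record values are
--     # strictly increasing, so each rj is answered by binary search.
--     recs = []
--     best = None
--     for i, q in enumerate(qi_array):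
--         if best is None or q > best:
--             recs.append((q, i))
--             best = q
--     out = []
--     n = len(recs)
--     for rj in rj_array:
--         lo, hi = 0, n
--         while lo < hi:
--             mid = (lo + hi) // 2
--             if recs[mid][0] > rj:
--                 hi = mid
--             else:
--                 lo = mid + 1
--         if lo < n:
--             out.append(recs[lo][1])
--     return out
-- ===== Notes on version B (the rewrite author's own statement) =====
-- stated objective: faster
-- what changed: B precomputes the strictly increasing prefix-maximum record list of qi_array once and answers each rj by binary search over it, instead of A's full linear rescan of qi_array per rj.
import Mathlib
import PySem

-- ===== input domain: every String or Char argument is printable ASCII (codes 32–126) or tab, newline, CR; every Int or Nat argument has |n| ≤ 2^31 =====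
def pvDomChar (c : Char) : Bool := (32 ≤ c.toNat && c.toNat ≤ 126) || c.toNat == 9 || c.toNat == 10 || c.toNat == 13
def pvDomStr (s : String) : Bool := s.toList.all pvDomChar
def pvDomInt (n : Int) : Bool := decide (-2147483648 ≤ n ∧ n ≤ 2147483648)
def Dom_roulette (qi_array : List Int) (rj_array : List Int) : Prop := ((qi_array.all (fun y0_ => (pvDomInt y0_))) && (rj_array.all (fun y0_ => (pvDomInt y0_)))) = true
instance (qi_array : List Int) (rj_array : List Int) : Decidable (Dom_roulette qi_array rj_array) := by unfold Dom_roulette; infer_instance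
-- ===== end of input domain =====

-- B replaces A's per-rj linear scan by a precomputed prefix-maximum record list
-- queried by binary search (objective: faster).

-- ===== PORT A =====
-- inner 'for i, qi in enumerate(qi_array): if qi > rj: … break'
def firstGt (qi : List Int) (i : Int) (rj : Int) : Option Int :=
  match qi with
  | [] => none
  | q :: t => if q > rj then some i else firstGt t (i + 1) rj

def roulette (qi_array : List Int) (rj_array : List Int) : List Int :=
  rj_array.foldl (fun acc rj =>
    match firstGt qi_array 0 rj with
    | some i => acc ++ [i]
    | none => acc) []

-- ===== PORT B =====
-- the 'for i, q in enumerate(qi_array)' loop building recs (best = last record value)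
def buildRecs (qi : List Int) (i : Int) (best : Option Int) : List (Int × Int) :=
  match qi with
  | [] => []
  | q :: t =>
    match best with
    | none => (q, i) :: buildRecs t (i + 1) (some q)
    | some b =>
      if q > b then (q, i) :: buildRecs t (i + 1) (some q)
      else buildRecs t (i + 1) (some b)

-- the 'while lo < hi' binary-search loop (recs[mid] is always in range in Source B)
def bsr (recs : List (Int × Int)) (rj : Int) (lo hi : Nat) : Nat :=
  if h : lo < hi then
    let mid := (lo + hi) / 2
    if (recs.getD mid (0, 0)).1 > rj then bsr recs rj lo mid
    else bsr recs rj (mid + 1) hi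
  else lo
termination_by hi - lo
decreasing_by all_goals omega

def roulette_alt (qi_array : List Int) (rj_array : List Int) : List Int :=
  let recs := buildRecs qi_array 0 none
  rj_array.foldl (fun acc rj =>
    let p := bsr recs rj 0 recs.length
    if p < recs.length then acc ++ [(recs.getD p (0, 0)).2] else acc) []

-- ===== PRECONDITION & SPEC =====
def Spec_roulette (qi_array : List Int) (rj_array : List Int) (out : List Int) : Prop := out = roulette_alt qi_array rj_array
instance (qi_array : List Int) (rj_array : List Int) (out : List Int) : Decidable (Spec_roulette qi_array rj_array out) := by unfold Spec_roulette; infer_instance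

-- ===== CLAIM (what is proved, stated in full; the proofs are below) =====
def Claim_equal_roulette : Prop := ∀ (qi_array : List Int) (rj_array : List Int), Dom_roulette qi_array rj_array → Spec_roulette qi_array rj_array (roulette qi_array rj_array)

-- ===== LEMMAS AND PROOFS =====

-- linear first-match over the record list (proof device linking the two ports)
def firstRec (recs : List (Int × Int)) (rj : Int) : Option Int :=
  match recs with
  | [] => none
  | (v, j) :: t => if v > rj then some j else firstRec t rj

-- A's scan equals the scan over the prefix-maximum records
theorem firstRec_buildRecs (rj : Int) :
    ∀ (qi : List Int) (i : Int) (best : Option Int),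
      (∀ b, best = some b → b ≤ rj) →
      firstRec (buildRecs qi i best) rj = firstGt qi i rj := by
  intro qi
  induction qi with
  | nil => intro i best _; simp [buildRecs, firstGt, firstRec]
  | cons q t ih =>
    intro i best hb
    cases best with
    | none =>
      by_cases hq : q > rj
      · simp [buildRecs, firstGt, firstRec, hq]
      · simp only [buildRecs, firstGt, firstRec, if_neg hq]
        exact ih (i + 1) (some q) (by intro b hbq; cases hbq; omega)
    | some b =>
      have hble : b ≤ rj := hb b rfl
      by_cases hqb : q > b
      · by_cases hq : q > rj
        · simp [buildRecs, firstGt, firstRec, hqb, hq]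
        · simp only [buildRecs, firstGt, if_pos hqb, firstRec, if_neg hq]
          exact ih (i + 1) (some q) (by intro c hc; cases hc; omega)
      · have hq : ¬ q > rj := by omega
        simp only [buildRecs, firstGt, if_neg hqb, if_neg hq]
        exact ih (i + 1) (some b) hb

theorem buildRecs_gt :
    ∀ (qi : List Int) (i : Int) (b : Int) (x : Int × Int),
      x ∈ buildRecs qi i (some b) → b < x.1 := by
  intro qi
  induction qi with
  | nil => intro i b x hx; simp [buildRecs] at hx
  | cons q t ih =>
    intro i b x hx
    by_cases hqb : q > b
    · simp only [buildRecs, if_pos hqb, List.mem_cons] at hx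
      rcases hx with rfl | hx
      · exact hqb
      · have := ih (i + 1) q x hx; omega
    · simp only [buildRecs, if_neg hqb] at hx
      exact ih (i + 1) b x hx

theorem buildRecs_sorted :
    ∀ (qi : List Int) (i : Int) (best : Option Int),
      List.Pairwise (fun a b : Int × Int => a.1 < b.1) (buildRecs qi i best) := by
  intro qi
  induction qi with
  | nil => intro i best; simp [buildRecs]
  | cons q t ih =>
    intro i best
    cases best with
    | none =>
      simp only [buildRecs]
      exact List.Pairwise.cons (fun x hx => buildRecs_gt t (i + 1) q x hx) (ih (i + 1) (some q))
    | some b =>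
      by_cases hqb : q > b
      · simp only [buildRecs, if_pos hqb]
        exact List.Pairwise.cons (fun x hx => buildRecs_gt t (i + 1) q x hx) (ih (i + 1) (some q))
      · simp only [buildRecs, if_neg hqb]
        exact ih (i + 1) (some b)

-- monotone values from sortedness
theorem recs_mono (recs : List (Int × Int))
    (hs : List.Pairwise (fun a b : Int × Int => a.1 < b.1) recs)
    (j k : Nat) (hjk : j ≤ k) (hk : k < recs.length) :
    (recs.getD j (0, 0)).1 ≤ (recs.getD k (0, 0)).1 := by
  rcases Nat.lt_or_ge j k with h | h
  · have hj : j < recs.length := by omega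
    have := (List.pairwise_iff_getElem.mp hs) j k hj hk h
    rw [List.getD_eq_getElem _ _ hj, List.getD_eq_getElem _ _ hk]
    omega
  · have : j = k := by omega
    subst this; omega

-- the binary-search loop finds the first record value exceeding rj
theorem bsr_spec (recs : List (Int × Int)) (rj : Int)
    (hs : List.Pairwise (fun a b : Int × Int => a.1 < b.1) recs) :
    ∀ (n lo hi : Nat), hi - lo ≤ n → lo ≤ hi → hi ≤ recs.length →
      (∀ k, k < lo → (recs.getD k (0, 0)).1 ≤ rj) →
      (∀ k, hi ≤ k → k < recs.length → (recs.getD k (0, 0)).1 > rj) →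
      (∀ k, k < bsr recs rj lo hi → (recs.getD k (0, 0)).1 ≤ rj) ∧
      (bsr recs rj lo hi < recs.length → (recs.getD (bsr recs rj lo hi) (0, 0)).1 > rj) ∧
      bsr recs rj lo hi ≤ recs.length := by
  intro n
  induction n with
  | zero =>
    intro lo hi hn hlh hhi hlow hhigh
    have heq : lo = hi := by omega
    rw [bsr]
    simp only [show ¬ lo < hi by omega, dif_neg, not_false_iff]
    refine ⟨hlow, fun h => hhigh lo (by omega) h, by omega⟩
  | succ n ih =>
    intro lo hi hn hlh hhi hlow hhigh
    rw [bsr]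
    by_cases h : lo < hi
    · simp only [dif_pos h]
      set mid := (lo + hi) / 2 with hmid
      have hmlt : mid < hi := by omega
      have hmge : lo ≤ mid := by omega
      have hmlen : mid < recs.length := by omega
      by_cases hv : (recs.getD mid (0, 0)).1 > rj
      · simp only [if_pos hv]
        exact ih lo mid (by omega) (by omega) (by omega) hlow
          (fun k hk hklen => lt_of_lt_of_le hv (recs_mono recs hs mid k hk hklen))
      · simp only [if_neg hv]
        exact ih (mid + 1) hi (by omega) (by omega) hhi
          (fun k hk => le_trans (recs_mono recs hs k mid (by omega) hmlen) (by omega))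
          hhigh
    · simp only [dif_neg h]
      refine ⟨hlow, fun hlt => hhigh lo (by omega) hlt, by omega⟩

-- characterisation: the two bounds pin down firstRec
theorem firstRec_of_bounds (rj : Int) :
    ∀ (recs : List (Int × Int)) (r : Nat),
      (∀ k, k < r → (recs.getD k (0, 0)).1 ≤ rj) →
      (r < recs.length → (recs.getD r (0, 0)).1 > rj) →
      r ≤ recs.length →
      firstRec recs rj =
        (if r < recs.length then some (recs.getD r (0, 0)).2 else none) := by
  intro recs
  induction recs with
  | nil => intro r _ _ hr; simp [firstRec]
  | cons x t ih =>
    intro r hlow hhit hr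
    obtain ⟨v, j⟩ := x
    cases r with
    | zero =>
      have hv : v > rj := by
        have := hhit (by simp); simpa using this
      simp [firstRec, hv]
    | succ r' =>
      have hv : ¬ v > rj := by
        have := hlow 0 (by omega); simp at this; omega
      simp only [firstRec, if_neg hv]
      have := ih r' (fun k hk => by
          have := hlow (k + 1) (by omega)
          simpa using this)
        (fun h => by
          have := hhit (by simpa using Nat.succ_lt_succ h)
          simpa using this)
        (by simpa using Nat.le_of_succ_le_succ (by simpa using hr))
      rw [this]
      by_cases hlt : r' < t.length
      · simp [hlt]
      · simp [hlt]

-- per-rj agreement of the two loop bodies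
theorem body_eq (qi : List Int) (rj : Int) :
    firstGt qi 0 rj =
      (let recs := buildRecs qi 0 none
       let p := bsr recs rj 0 recs.length
       if p < recs.length then some (recs.getD p (0, 0)).2 else none) := by
  set recs := buildRecs qi 0 none with hrecs
  have hs := buildRecs_sorted qi 0 none
  have hspec := bsr_spec recs rj (by rw [hrecs]; exact hs) recs.length 0 recs.length
    (by omega) (by omega) (le_refl _)
    (fun k hk => absurd hk (by omega))
    (fun k hk hklen => absurd (lt_of_le_of_lt hk hklen) (by omega))
  have h1 := firstRec_of_bounds rj recs (bsr recs rj 0 recs.length)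
    hspec.1 hspec.2.1 hspec.2.2
  have h2 := firstRec_buildRecs rj qi 0 none (by intro b hb; cases hb)
  rw [hrecs] at h1 ⊢
  rw [← h2, h1]

-- ===== VERDICT (by name: the statement is the Claim_ definition above) =====
theorem roulette_spec : Claim_equal_roulette := by
  intro qi_array rj_array _
  unfold Spec_roulette roulette roulette_alt
  have hfun : (fun (acc : List Int) rj =>
      match firstGt qi_array 0 rj with
      | some i => acc ++ [i]
      | none => acc) =
      (fun (acc : List Int) rj =>
        let recs := buildRecs qi_array 0 none
        let p := bsr recs rj 0 recs.length
        if p < recs.length then acc ++ [(recs.getD p (0, 0)).2] else acc) := by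
    funext acc rj
    have := body_eq qi_array rj
    simp only at this
    rw [this]
    by_cases h : bsr (buildRecs qi_array 0 none) rj 0 (buildRecs qi_array 0 none).length < (buildRecs qi_array 0 none).length
    · simp [h]
    · simp [h]
  rw [hfun]
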